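-- pv_equiv track=rewrite | github.com/pypi-data/pypi-mirror-400 | packages/code-recap/code_recap-1.3.1-py3-none-any.whl/code_recap/generate_html_report.py | _convert_paragraphs
-- ===== SOURCE A (Python) =====
-- def _convert_paragraphs(html: str) -> str:
--     """Wraps text blocks in paragraph tags."""
--     lines = html.split("\n")
--     result = []
--     paragraph = []
--
--     def flush_paragraph():
--         if paragraph:
--             text = " ".join(paragraph)
--             if text.strip():
--                 result.append(f"<p>{text.strip()}</p>")
--             paragraph.clear()
--
--     for line in lines:
--         stripped = line.strip()
--         if stripped.startswith("<") or stripped.startswith("#") or not stripped: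
--             flush_paragraph()
--             if stripped:
--                 result.append(line)
--         else:
--             paragraph.append(stripped)
--
--     flush_paragraph()
--     return "\n".join(result)
-- ===== SOURCE B (Python) =====
-- def _convert_paragraphs(html: str) -> str:
--     """Wraps text blocks in paragraph tags (run/span-based re-implementation)."""
--
--     def is_para(line: str) -> bool:
--         s = line.strip()
--         return bool(s) and not s.startswith("<") and not s.startswith("#")
--
--     lines = html.split("\n")
--     n = len(lines)
--     out = []
--     i = 0
--     while i < n:
--         if is_para(lines[i]):
--             j = i
--             while j < n and is_para(lines[j]):
--                 j += 1
--             out.append("<p>" + " ".join(l.strip() for l in lines[i:j]) + "</p>")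
--             i = j
--         else:
--             if lines[i].strip():
--                 out.append(lines[i])
--             i += 1
--     return "\n".join(out)
-- ===== Notes on version B (the rewrite author's own statement) =====
-- stated objective: alternative
-- what changed: Replaces A's single pass with a mutable pending-paragraph buffer and flush closure by a run-based scan: each maximal run of paragraph lines is located with an inner while and emitted at once as one <p> element, non-paragraph lines are passed through directly, so no buffer or flush step exists.
import Mathlib
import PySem

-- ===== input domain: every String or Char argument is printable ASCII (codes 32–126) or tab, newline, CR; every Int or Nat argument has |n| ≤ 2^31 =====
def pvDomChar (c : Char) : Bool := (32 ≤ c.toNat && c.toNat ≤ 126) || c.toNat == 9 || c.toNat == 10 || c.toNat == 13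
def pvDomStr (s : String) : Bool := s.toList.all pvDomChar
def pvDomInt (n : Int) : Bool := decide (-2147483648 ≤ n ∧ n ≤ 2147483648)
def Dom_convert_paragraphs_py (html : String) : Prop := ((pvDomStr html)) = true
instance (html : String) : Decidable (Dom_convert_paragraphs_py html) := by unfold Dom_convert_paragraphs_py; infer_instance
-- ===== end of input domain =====

-- B replaces A's pending-paragraph buffer and flush closure by a run-based scan
-- (each maximal run of paragraph lines is found and emitted at once); alternative
-- decomposition, same cost.

-- ===== PORT A =====
-- flush_paragraph: works on the accumulated (result, paragraph) state
def pvAFlush (result paragraph : List (List Char)) : List (List Char) :=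
  if paragraph.isEmpty then result
  else
    let text := PySem.Chars.join [' '] paragraph
    if (PySem.Chars.strip text).isEmpty then result
    else result ++ [['<','p','>'] ++ PySem.Chars.strip text ++ ['<','/','p','>']]

-- the for-loop over lines, state = (result, paragraph)
def pvALoop : List (List Char) → List (List Char) → List (List Char) → List (List Char)
  | [], result, paragraph => pvAFlush result paragraph
  | line :: rest, result, paragraph =>
    let stripped := PySem.Chars.strip line
    if PySem.Chars.startswith stripped ['<'] || PySem.Chars.startswith stripped ['#']
        || stripped.isEmpty then
      let result1 := pvAFlush result paragraph
      let result2 := if stripped.isEmpty then result1 else result1 ++ [line]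
      pvALoop rest result2 []
    else
      pvALoop rest result (paragraph ++ [stripped])

def convert_paragraphs_py (html : String) : String :=
  String.ofList (PySem.Chars.join ['\n']
    (pvALoop (PySem.Chars.splitOn html.toList ['\n']) [] []))

-- ===== PORT B =====
-- is_para: a line that belongs inside a paragraph run
def pvIsPara (line : List Char) : Bool :=
  let s := PySem.Chars.strip line
  !s.isEmpty && !PySem.Chars.startswith s ['<'] && !PySem.Chars.startswith s ['#']

-- the while-loop of Source B: a paragraph run (inner while = maximal take) is emitted
-- at once, other lines pass through (blank lines dropped)
def pvBGo : List (List Char) → List (List Char)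
  | [] => []
  | line :: rest =>
    if h : pvIsPara line then
      let run := List.takeWhile pvIsPara (line :: rest)
      let tail := List.dropWhile pvIsPara (line :: rest)
      (['<','p','>'] ++ PySem.Chars.join [' '] (run.map PySem.Chars.strip)
        ++ ['<','/','p','>']) :: pvBGo tail
    else
      if (PySem.Chars.strip line).isEmpty then pvBGo rest
      else line :: pvBGo rest
termination_by ls => ls.length
decreasing_by
  · simp only [List.dropWhile_cons, h]
    exact Nat.lt_succ_of_le (List.length_dropWhile_le _ _)
  · simp
  · simp

def convert_paragraphs_py_alt (html : String) : String :=
  String.ofList (PySem.Chars.join ['\n']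
    (pvBGo (PySem.Chars.splitOn html.toList ['\n'])))

-- ===== PRECONDITION & SPEC =====
def Spec_convert_paragraphs_py (html : String) (out : String) : Prop := out = convert_paragraphs_py_alt html
instance (html : String) (out : String) : Decidable (Spec_convert_paragraphs_py html out) := by unfold Spec_convert_paragraphs_py; infer_instance

-- ===== CLAIM (what is proved, stated in full; the proofs are below) =====
def Claim_equal_convert_paragraphs_py : Prop := ∀ (html : String), Dom_convert_paragraphs_py html → Spec_convert_paragraphs_py html (convert_paragraphs_py html)

-- ===== LEMMAS AND PROOFS =====

-- a "clean" char list has no leading/trailing whitespace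
def pvClean (cs : List Char) : Prop :=
  PySem.Chars.lstrip cs = cs ∧ PySem.Chars.rstrip cs = cs

def pvGood (p : List (List Char)) : Prop := ∀ e ∈ p, e ≠ [] ∧ pvClean e

-- what pvAFlush appends, for a Good paragraph buffer
def pvEmit (p : List (List Char)) : List (List Char) :=
  if p.isEmpty then []
  else [['<','p','>'] ++ PySem.Chars.join [' '] p ++ ['<','/','p','>']]

-- A's loop without the result accumulator
def pvF : List (List Char) → List (List Char) → List (List Char)
  | p, [] => pvEmit p
  | p, line :: rest =>
    if pvIsPara line then pvF (p ++ [PySem.Chars.strip line]) rest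
    else pvEmit p ++ (if (PySem.Chars.strip line).isEmpty then [] else [line]) ++ pvF [] rest

theorem pv_dropWhile_head (q : Char → Bool) (c : Char) (l : List Char)
    (h : List.dropWhile q (c :: l) = c :: l) : q c = false := by
  by_cases hc : q c = true
  · simp [List.dropWhile_cons, hc] at h
    have := congrArg List.length h
    have hle := List.length_dropWhile_le q l
    simp at this; omega
  · simpa using hc

theorem pv_dropWhile_idem (q : Char → Bool) (l : List Char) :
    List.dropWhile q (List.dropWhile q l) = List.dropWhile q l := by
  induction l with
  | nil => simp
  | cons c t ih =>
    by_cases hc : q c = true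
    · simp [List.dropWhile_cons, hc, ih]
    · simp [List.dropWhile_cons, hc]

theorem pv_dropWhile_app (q : Char → Bool) (l r : List Char)
    (h : List.dropWhile q l = l) (hne : l ≠ []) :
    List.dropWhile q (l ++ r) = l ++ r := by
  cases l with
  | nil => exact absurd rfl hne
  | cons c t =>
    have hc := pv_dropWhile_head q c t h
    simp [List.dropWhile_cons, hc]

theorem pv_lstrip_app (a r : List Char) (h : PySem.Chars.lstrip a = a) (hne : a ≠ []) :
    PySem.Chars.lstrip (a ++ r) = a ++ r := by
  unfold PySem.Chars.lstrip at *
  exact pv_dropWhile_app _ a r h hne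

theorem pv_rstrip_app (a b : List Char) (h : PySem.Chars.rstrip b = b) (hne : b ≠ []) :
    PySem.Chars.rstrip (a ++ b) = a ++ b := by
  unfold PySem.Chars.rstrip at *
  have hb : List.dropWhile PySem.Chars.isspace b.reverse = b.reverse := by
    have := congrArg List.reverse h
    simpa using this
  have hbne : b.reverse ≠ [] := by simpa using hne
  have := pv_dropWhile_app _ b.reverse a.reverse hb hbne
  simp [this]

theorem pv_clean_strip (x : List Char) : pvClean (PySem.Chars.strip x) := by
  unfold pvClean PySem.Chars.strip
  constructor
  · -- lstrip (rstrip (lstrip x)) = rstrip (lstrip x)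
    set z := PySem.Chars.lstrip x with hz
    have hzidem : List.dropWhile PySem.Chars.isspace z = z := by
      simp [hz, PySem.Chars.lstrip, pv_dropWhile_idem]
    cases hs : PySem.Chars.rstrip z with
    | nil => simp [PySem.Chars.lstrip]
    | cons c t =>
      -- rstrip z is a prefix of z, so z = c :: t ++ u, hence isspace c = false
      have hpre : PySem.Chars.rstrip z <+: z := by
        unfold PySem.Chars.rstrip
        have hsuf : List.dropWhile PySem.Chars.isspace z.reverse <:+ z.reverse :=
          List.dropWhile_suffix _
        have := List.reverse_prefix.mpr hsuf
        simpa using this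
      rw [hs] at hpre
      obtain ⟨u, hu⟩ := hpre
      have hzeq : z = c :: (t ++ u) := by rw [← hu]; simp
      have hz2 : List.dropWhile PySem.Chars.isspace (c :: (t ++ u)) = c :: (t ++ u) := by
        rw [← hzeq]; exact hzidem
      have hc := pv_dropWhile_head _ c (t ++ u) hz2
      simp [PySem.Chars.lstrip, List.dropWhile_cons, hc]
  · -- rstrip is idempotent
    unfold PySem.Chars.rstrip PySem.Chars.lstrip
    simp [pv_dropWhile_idem]

theorem pv_strip_eq_of_clean (cs : List Char) (h : pvClean cs) :
    PySem.Chars.strip cs = cs := by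
  unfold PySem.Chars.strip
  rw [h.1, h.2]

theorem pv_join_clean (p : List (List Char)) (hg : pvGood p) (hne : p ≠ []) :
    pvClean (PySem.Chars.join [' '] p) ∧ PySem.Chars.join [' '] p ≠ [] := by
  induction p with
  | nil => exact absurd rfl hne
  | cons e rest ih =>
    obtain ⟨hene, helstrip, herstrip⟩ :
        e ≠ [] ∧ PySem.Chars.lstrip e = e ∧ PySem.Chars.rstrip e = e := by
      have := hg e (by simp)
      exact ⟨this.1, this.2.1, this.2.2⟩
    cases rest with
    | nil =>
      simp [PySem.Chars.join, List.intercalate]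
      exact ⟨⟨helstrip, herstrip⟩, hene⟩
    | cons f t =>
      have hgr : pvGood (f :: t) := fun x hx => hg x (by simp [hx])
      obtain ⟨⟨hjl, hjr⟩, hjne⟩ := ih hgr (by simp)
      have hjoin : PySem.Chars.join [' '] (e :: f :: t)
          = e ++ [' '] ++ PySem.Chars.join [' '] (f :: t) := by
        rw [PySem.Chars.join_cons_cons]
      rw [hjoin]
      refine ⟨⟨?_, ?_⟩, by simp [hene]⟩
      · rw [List.append_assoc]
        exact pv_lstrip_app e _ helstrip hene
      · exact pv_rstrip_app _ _ hjr hjne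

theorem pv_flush_emit (r p : List (List Char)) (hg : pvGood p) :
    pvAFlush r p = r ++ pvEmit p := by
  unfold pvAFlush pvEmit
  cases hp : p.isEmpty with
  | true => simp
  | false =>
    have hpne : p ≠ [] := by simpa [List.isEmpty_iff] using hp
    obtain ⟨hclean, hjne⟩ := pv_join_clean p hg hpne
    have hstrip := pv_strip_eq_of_clean _ hclean
    simp only [if_neg (by simp [hp] : ¬ p.isEmpty = true)]
    rw [hstrip]
    simp [List.isEmpty_iff, hjne]

-- A's branch condition is the negation of pvIsPara
theorem pv_cond_iff (line : List Char) :
    (PySem.Chars.startswith (PySem.Chars.strip line) ['<']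
      || PySem.Chars.startswith (PySem.Chars.strip line) ['#']
      || (PySem.Chars.strip line).isEmpty) = !pvIsPara line := by
  simp only [pvIsPara]
  cases h1 : PySem.Chars.startswith (PySem.Chars.strip line) ['<'] <;>
    cases h2 : PySem.Chars.startswith (PySem.Chars.strip line) ['#'] <;>
    cases hs : (PySem.Chars.strip line).isEmpty <;> simp [h1, h2, hs]

theorem pv_loop_F (ls : List (List Char)) :
    ∀ r p, pvGood p → pvALoop ls r p = r ++ pvF p ls := by
  induction ls with
  | nil =>
    intro r p hg
    simpa [pvALoop, pvF] using pv_flush_emit r p hg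
  | cons line rest ih =>
    intro r p hg
    rw [pvALoop, pvF]
    rw [pv_cond_iff line]
    cases hpar : pvIsPara line with
    | true =>
      have hs : pvIsPara line = true := hpar
      have hgood : pvGood (p ++ [PySem.Chars.strip line]) := by
        intro e he
        rcases List.mem_append.mp he with h | h
        · exact hg e h
        · have : e = PySem.Chars.strip line := by simpa using h
          subst this
          refine ⟨?_, pv_clean_strip line⟩
          unfold pvIsPara at hs
          simp only [Bool.and_eq_true, Bool.not_eq_true'] at hs
          simpa [List.isEmpty_iff] using hs.1.1
      rw [if_neg (by simp), if_pos rfl]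
      exact ih r _ hgood
    | false =>
      rw [if_pos (by simp), if_neg (by simp)]
      rw [pv_flush_emit r p hg]
      cases hse : (PySem.Chars.strip line).isEmpty with
      | true => simp [hpar, hse, ih _ [] (by intro e he; simp at he)]
      | false => simp [hpar, hse, ih _ [] (by intro e he; simp at he)]

theorem pv_F_run (ls : List (List Char)) :
    ∀ p, pvGood p → p ≠ [] →
      pvF p ls = (['<','p','>']
          ++ PySem.Chars.join [' '] (p ++ (List.takeWhile pvIsPara ls).map PySem.Chars.strip)
          ++ ['<','/','p','>']) :: pvF [] (List.dropWhile pvIsPara ls) := by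
  induction ls with
  | nil =>
    intro p hg hne
    simp [pvF, pvEmit, List.isEmpty_iff, hne]
  | cons line rest ih =>
    intro p hg hne
    rw [pvF]
    cases hpar : pvIsPara line with
    | true =>
      have hgood : pvGood (p ++ [PySem.Chars.strip line]) := by
        intro e he
        rcases List.mem_append.mp he with h | h
        · exact hg e h
        · have : e = PySem.Chars.strip line := by simpa using h
          subst this
          refine ⟨?_, pv_clean_strip line⟩
          unfold pvIsPara at hpar
          simp only [Bool.and_eq_true, Bool.not_eq_true'] at hpar
          simpa [List.isEmpty_iff] using hpar.1.1
      rw [if_pos (by simp [hpar])]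
      rw [ih _ hgood (by simp)]
      simp [List.takeWhile_cons, List.dropWhile_cons, hpar]
    | false =>
      rw [if_neg (by simp [hpar])]
      simp [List.takeWhile_cons, List.dropWhile_cons, hpar, pvEmit, List.isEmpty_iff, hne,
        pvF]

theorem pv_F_bGo (ls : List (List Char)) : pvF [] ls = pvBGo ls := by
  induction hlen : ls.length using Nat.strong_induction_on generalizing ls with
  | _ n ih =>
    cases ls with
    | nil => simp [pvF, pvBGo, pvEmit]
    | cons line rest =>
      rw [pvF, pvBGo]
      cases hpar : pvIsPara line with
      | true =>
        rw [if_pos (by simp), dif_pos rfl]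
        have hgood : pvGood [PySem.Chars.strip line] := by
          intro e he
          have : e = PySem.Chars.strip line := by simpa using he
          subst this
          refine ⟨?_, pv_clean_strip line⟩
          unfold pvIsPara at hpar
          simp only [Bool.and_eq_true, Bool.not_eq_true'] at hpar
          simpa [List.isEmpty_iff] using hpar.1.1
        rw [List.nil_append, pv_F_run rest _ hgood (by simp)]
        have hdrop : (List.dropWhile pvIsPara rest).length < n := by
          have := List.length_dropWhile_le pvIsPara rest
          subst hlen; simp; omega
        rw [ih _ hdrop _ rfl]
        simp [List.takeWhile_cons, List.dropWhile_cons, hpar]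
      | false =>
        rw [if_neg (by simp), dif_neg (by simp)]
        have hrest : rest.length < n := by subst hlen; simp
        rw [ih _ hrest _ rfl]
        cases hse : (PySem.Chars.strip line).isEmpty <;> simp [hse, pvEmit]

-- ===== VERDICT (by name: the statement is the Claim_ definition above) =====
theorem convert_paragraphs_py_spec : Claim_equal_convert_paragraphs_py := by
  intro html _
  unfold Spec_convert_paragraphs_py convert_paragraphs_py convert_paragraphs_py_alt
  rw [pv_loop_F _ [] [] (by intro e he; simp at he)]
  rw [List.nil_append, pv_F_bGo]
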